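-- pv_equiv track=rewrite | github.com/udairathore/Thesis | One_D_to_Three_D.py | one_d_to_three_d_converter
-- ===== SOURCE A (Python) =====
-- def one_d_to_three_d_converter(one_d_stream, pointers, o_rows,o_cols, o_chans, output_tensor):
--     i = 0
--     for rows in range(o_rows):
--         for cols in range(o_cols):
--             for chans in range(o_chans):
--                 if i < len(one_d_stream):
--                     output_tensor[chans][rows][cols] = one_d_stream[i]
--                     i += 1
--
--     return output_tensor
-- ===== SOURCE B (Python) =====
-- def one_d_to_three_d_converter(one_d_stream, pointers, o_rows, o_cols, o_chans, output_tensor):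
--     capacity = max(o_rows, 0) * max(o_cols, 0) * max(o_chans, 0)
--     n = min(len(one_d_stream), capacity)
--     for i in range(n):
--         chans = i % o_chans
--         cols = (i // o_chans) % o_cols
--         rows = i // (o_chans * o_cols)
--         output_tensor[chans][rows][cols] = one_d_stream[i]
--     return output_tensor
-- ===== Notes on version B (the rewrite author's own statement) =====
-- stated objective: alternative
-- what changed: Replaced the triple nested loop over (rows, cols, chans) with a running counter by a single flat loop over the stream index i, decoding the destination coordinates arithmetically (chans = i % o_chans, cols = (i // o_chans) % o_cols, rows = i // (o_chans*o_cols)) and clamping the loop to min(len(stream), capacity).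
import Mathlib
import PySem

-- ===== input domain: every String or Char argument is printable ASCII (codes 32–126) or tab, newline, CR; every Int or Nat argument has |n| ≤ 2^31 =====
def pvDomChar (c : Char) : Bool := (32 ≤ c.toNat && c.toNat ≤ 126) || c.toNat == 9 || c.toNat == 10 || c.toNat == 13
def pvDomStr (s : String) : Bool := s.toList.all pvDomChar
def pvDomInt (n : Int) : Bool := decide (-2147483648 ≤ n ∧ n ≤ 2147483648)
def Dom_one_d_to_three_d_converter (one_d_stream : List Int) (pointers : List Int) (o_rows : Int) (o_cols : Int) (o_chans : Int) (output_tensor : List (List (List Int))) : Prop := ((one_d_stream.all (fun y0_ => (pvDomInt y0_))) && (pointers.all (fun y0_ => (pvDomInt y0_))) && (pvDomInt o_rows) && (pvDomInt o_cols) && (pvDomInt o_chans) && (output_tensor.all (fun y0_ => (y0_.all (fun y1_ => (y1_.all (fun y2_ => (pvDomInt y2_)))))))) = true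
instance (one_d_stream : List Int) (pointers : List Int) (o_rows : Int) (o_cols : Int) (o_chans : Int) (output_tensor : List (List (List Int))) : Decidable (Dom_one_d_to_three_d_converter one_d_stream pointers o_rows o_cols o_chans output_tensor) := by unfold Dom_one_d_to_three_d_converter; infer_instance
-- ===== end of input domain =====

-- B replaces A's triple nested loop (coordinates-with-running-counter) by one flat loop over the
-- stream index that decodes the destination coordinates arithmetically; same return value.
-- Both Pythons mutate output_tensor in place in the same way; the theorems are about the return value.

-- ===== PORT A =====
-- 'output_tensor[chans][rows][cols] = v' : total form of the nested assignment; exact whenever the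
-- three indices are in range (Pre_ admits exactly those inputs; out of range Python raises IndexError).
def pvSet3 (t : List (List (List Int))) (c r k : Int) (v : Int) : List (List (List Int)) :=
  t.modify c.toNat (fun layer => layer.modify r.toNat (fun row => row.set k.toNat v))

def one_d_to_three_d_converter (one_d_stream : List Int) (pointers : List Int) (o_rows : Int) (o_cols : Int) (o_chans : Int) (output_tensor : List (List (List Int))) : List (List (List Int)) :=
  (((PySem.List.pyRange 0 o_rows 1).foldl (fun st rows =>
      (PySem.List.pyRange 0 o_cols 1).foldl (fun st cols =>
        (PySem.List.pyRange 0 o_chans 1).foldl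
          (fun (st : List (List (List Int)) × Int) chans =>
            if st.2 < (one_d_stream.length : Int) then
              (pvSet3 st.1 chans rows cols (PySem.List.pyGetD one_d_stream st.2 0), st.2 + 1)
            else st) st) st)
    (output_tensor, (0 : Int)))).1

-- ===== PORT B =====
def one_d_to_three_d_converter_alt (one_d_stream : List Int) (pointers : List Int) (o_rows : Int) (o_cols : Int) (o_chans : Int) (output_tensor : List (List (List Int))) : List (List (List Int)) :=
  let capacity := max o_rows 0 * max o_cols 0 * max o_chans 0
  let n := min (one_d_stream.length : Int) capacity
  (PySem.List.pyRange 0 n 1).foldl (fun t i =>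
    pvSet3 t (PySem.Int.mod i o_chans)
             (PySem.Int.floordiv i (o_chans * o_cols))
             (PySem.Int.mod (PySem.Int.floordiv i o_chans) o_cols)
             (PySem.List.pyGetD one_d_stream i 0)) output_tensor

-- ===== PRECONDITION & SPEC =====
-- Pre_ holds exactly when every assignment A attempts (the i-th element of the stream goes to
-- output_tensor[i % o_chans][i // (o_chans*o_cols)][(i // o_chans) % o_cols], for the first
-- min(len(stream), capacity) indices i) is within the bounds of output_tensor; on any other input
-- Python A raises IndexError.
def Pre_one_d_to_three_d_converter (one_d_stream : List Int) (pointers : List Int) (o_rows : Int) (o_cols : Int) (o_chans : Int) (output_tensor : List (List (List Int))) : Prop :=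
  ∀ i ∈ PySem.List.pyRange 0 (min (one_d_stream.length : Int) (max o_rows 0 * max o_cols 0 * max o_chans 0)) 1,
    (PySem.Int.mod i o_chans).toNat < output_tensor.length ∧
    (PySem.Int.floordiv i (o_chans * o_cols)).toNat < (output_tensor.getD (PySem.Int.mod i o_chans).toNat []).length ∧
    (PySem.Int.mod (PySem.Int.floordiv i o_chans) o_cols).toNat < ((output_tensor.getD (PySem.Int.mod i o_chans).toNat []).getD (PySem.Int.floordiv i (o_chans * o_cols)).toNat []).length
instance (one_d_stream : List Int) (pointers : List Int) (o_rows : Int) (o_cols : Int) (o_chans : Int) (output_tensor : List (List (List Int))) : Decidable (Pre_one_d_to_three_d_converter one_d_stream pointers o_rows o_cols o_chans output_tensor) := by unfold Pre_one_d_to_three_d_converter; infer_instance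

def pvWitness_one_d_to_three_d_converter : List Int × List Int × Int × Int × Int × List (List (List Int)) :=
  ([1, 2, 3], [], 1, 2, 1, [[[0, 0]]])

def Spec_one_d_to_three_d_converter (one_d_stream : List Int) (pointers : List Int) (o_rows : Int) (o_cols : Int) (o_chans : Int) (output_tensor : List (List (List Int))) (out : List (List (List Int))) : Prop := out = one_d_to_three_d_converter_alt one_d_stream pointers o_rows o_cols o_chans output_tensor
instance (one_d_stream : List Int) (pointers : List Int) (o_rows : Int) (o_cols : Int) (o_chans : Int) (output_tensor : List (List (List Int))) (out : List (List (List Int))) : Decidable (Spec_one_d_to_three_d_converter one_d_stream pointers o_rows o_cols o_chans output_tensor out) := by unfold Spec_one_d_to_three_d_converter; infer_instance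

-- ===== CLAIM (what is proved, stated in full; the proofs are below) =====
def Claim_equal_one_d_to_three_d_converter : Prop := ∀ (one_d_stream : List Int) (pointers : List Int) (o_rows : Int) (o_cols : Int) (o_chans : Int) (output_tensor : List (List (List Int))), Dom_one_d_to_three_d_converter one_d_stream pointers o_rows o_cols o_chans output_tensor → Pre_one_d_to_three_d_converter one_d_stream pointers o_rows o_cols o_chans output_tensor → Spec_one_d_to_three_d_converter one_d_stream pointers o_rows o_cols o_chans output_tensor (one_d_to_three_d_converter one_d_stream pointers o_rows o_cols o_chans output_tensor)

-- ===== LEMMAS AND PROOFS =====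

-- A's traversal order, as a list of (row, col, chan) coordinate triples.
def pvCoords (R C H : Nat) : List (Nat × Nat × Nat) :=
  (List.range R).flatMap (fun r => (List.range C).flatMap (fun c => (List.range H).map (fun h => (r, c, h))))

-- the guarded write A performs at stream position p on coordinates x
def pvG (s : List Int) (t : List (List (List Int))) (p : Nat) (x : Nat × Nat × Nat) : List (List (List Int)) :=
  if p < s.length then pvSet3 t (x.2.2 : Int) (x.1 : Int) (x.2.1 : Int) (s.getD p 0) else t

-- A's loop with the counter made structural
def pvF (s : List Int) : List (Nat × Nat × Nat) → List (List (List Int)) → Nat → List (List (List Int))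
  | [], t, _ => t
  | x :: xs, t, k => pvF s xs (pvG s t k x) (k + 1)

-- A's loop body on the (tensor, counter) state
def pvStepInt (s : List Int) (st : List (List (List Int)) × Int) (x : Nat × Nat × Nat) :
    List (List (List Int)) × Int :=
  if st.2 < (s.length : Int) then
    (pvSet3 st.1 (x.2.2 : Int) (x.1 : Int) (x.2.1 : Int) (PySem.List.pyGetD s st.2 0), st.2 + 1)
  else st

lemma pvCoords_length (R C H : Nat) : (pvCoords R C H).length = R * C * H := by
  simp [pvCoords, List.length_flatMap, List.map_const']
  ring

lemma pvCoords_succ (R C H : Nat) :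
    pvCoords (R + 1) C H = pvCoords R C H ++
      (List.range C).flatMap (fun c => (List.range H).map (fun h => (R, c, h))) := by
  simp [pvCoords, List.range_succ]

lemma pvBlock_length (r C H : Nat) :
    ((List.range C).flatMap (fun c => (List.range H).map (fun h => (r, c, h)))).length = C * H := by
  simp [List.length_flatMap, List.map_const']


lemma pvBlock_getElem? (r C H j : Nat) (h : j < C * H) :
    ((List.range C).flatMap (fun c => (List.range H).map (fun h => (r, c, h))))[j]?
      = some (r, j / H, j % H) := by
  induction C with
  | zero => omega
  | succ C ih =>
    rw [List.range_succ, List.flatMap_append]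
    by_cases hj : j < C * H
    · rw [List.getElem?_append_left (by rw [pvBlock_length]; exact hj)]
      exact ih hj
    · have hH : 0 < H := by
        rcases Nat.eq_zero_or_pos H with h0 | h0
        · subst h0; omega
        · exact h0
      have hsucc : (C + 1) * H = C * H + H := by ring
      rw [List.getElem?_append_right (by rw [pvBlock_length]; omega)]
      simp only [pvBlock_length, List.flatMap_cons, List.flatMap_nil, List.append_nil]
      rw [List.getElem?_map, List.getElem?_range (by omega)]
      have hd : j / H = C := Nat.div_eq_of_lt_le (by omega) (by omega)
      have hm : C * H + j % H = j := by
        have h0 := Nat.div_add_mod j H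
        rw [hd, Nat.mul_comm] at h0
        omega
      have h2 : j - C * H = j % H := by omega
      rw [h2, hd]
      simp

lemma pvCoords_getElem? (R C H i : Nat) (h : i < R * C * H) :
    (pvCoords R C H)[i]? = some (i / (C * H), (i / H) % C, i % H) := by
  induction R with
  | zero => simp at h
  | succ R ih =>
    rw [pvCoords_succ]
    have hsucc : (R + 1) * C * H = R * C * H + C * H := by ring
    by_cases hi : i < R * C * H
    · rw [List.getElem?_append_left (by rw [pvCoords_length]; exact hi)]
      exact ih hi
    · have hCH : 0 < C * H := by omega
      have hH : 0 < H := by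
        rcases Nat.eq_zero_or_pos H with h0 | h0
        · subst h0; omega
        · exact h0
      rw [List.getElem?_append_right (by rw [pvCoords_length]; omega)]
      rw [pvCoords_length, pvBlock_getElem? R C H (i - R * C * H) (by omega)]
      have hmul : (R + 1) * (C * H) = R * C * H + C * H := by ring
      have hRCH : R * (C * H) = R * C * H := by ring
      have hdiv : i / (C * H) = R := Nat.div_eq_of_lt_le (by omega) (by omega)
      have hdivH : i / H = (i - R * C * H) / H + R * C := by
        conv_lhs => rw [show i = (i - R * C * H) + R * C * H from by omega]
        rw [Nat.add_mul_div_right _ _ hH]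
      have hmodC : (i / H) % C = ((i - R * C * H) / H) % C := by
        rw [hdivH, Nat.add_mul_mod_self_right]
      have hmodH : i % H = (i - R * C * H) % H := by
        conv_lhs => rw [show i = (i - R * C * H) + R * C * H from by omega]
        rw [Nat.add_mul_mod_self_right]
      have hHC : H * C = C * H := by ring
      have hjH : (i - R * C * H) / H < C := Nat.div_lt_of_lt_mul (by omega)
      rw [hdiv, hmodC, hmodH, Nat.mod_eq_of_lt hjH]

lemma pvF_const (s : List Int) (l : List (Nat × Nat × Nat)) :
    ∀ (t : List (List (List Int))) (k : Nat), s.length ≤ k → pvF s l t k = t := by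
  induction l with
  | nil => intro t k _; rfl
  | cons x xs ih =>
    intro t k hk
    have : pvG s t k x = t := by simp [pvG]; omega
    rw [pvF, this, ih _ _ (by omega)]

lemma pv_counter (s : List Int) (l : List (Nat × Nat × Nat)) :
    ∀ (t : List (List (List Int))) (k : Nat), k ≤ s.length →
      l.foldl (pvStepInt s) (t, (k : Int)) =
        (pvF s l t k, ((min (k + l.length) s.length : Nat) : Int)) := by
  induction l with
  | nil => intro t k hk; simp [pvF]; omega
  | cons x xs ih =>
    intro t k hk
    by_cases hlt : k < s.length
    · have h1 : pvStepInt s (t, (k : Int)) x =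
          (pvG s t k x, ((k + 1 : Nat) : Int)) := by
        simp [pvStepInt, pvG, hlt]
      rw [List.foldl_cons, h1, ih _ (k + 1) (by omega)]
      simp [pvF]
      omega
    · have hk' : k = s.length := by omega
      have h1 : pvStepInt s (t, (k : Int)) x = (pvG s t k x, (k : Int)) := by
        simp [pvStepInt, pvG, hlt]
      rw [List.foldl_cons, h1, ih _ k hk]
      subst hk'
      simp [pvF]
      rw [pvF_const s xs _ _ (le_refl _), pvF_const s xs _ _ (by omega)]

lemma pvA_fold (s p : List Int) (R C H : Int) (t : List (List (List Int))) :
    one_d_to_three_d_converter s p R C H t =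
      ((pvCoords R.toNat C.toNat H.toNat).foldl (pvStepInt s) (t, (0 : Int))).1 := by
  unfold one_d_to_three_d_converter pvCoords pvStepInt
  simp only [PySem.List.pyRange_one, Int.sub_zero, List.foldl_map, List.foldl_flatMap, zero_add]

lemma pvA_eq_pvF (s p : List Int) (R C H : Int) (t : List (List (List Int))) :
    one_d_to_three_d_converter s p R C H t = pvF s (pvCoords R.toNat C.toNat H.toNat) t 0 := by
  rw [pvA_fold, show ((0 : Int)) = ((0 : Nat) : Int) from rfl,
    pv_counter s _ t 0 (Nat.zero_le _)]

lemma pvB_eq_rangeFold (s p : List Int) (R C H : Int) (t : List (List (List Int))) :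
    one_d_to_three_d_converter_alt s p R C H t =
      (List.range (min s.length (R.toNat * C.toNat * H.toNat))).foldl
        (fun t i => pvSet3 t ((i % H.toNat : Nat) : Int) ((i / (C.toNat * H.toNat) : Nat) : Int)
          (((i / H.toNat) % C.toNat : Nat) : Int) (s.getD i 0)) t := by
  unfold one_d_to_three_d_converter_alt
  have hcap : max R 0 * max C 0 * max H 0 = ((R.toNat * C.toNat * H.toNat : Nat) : Int) := by
    rw [← Int.toNat_eq_max, ← Int.toNat_eq_max, ← Int.toNat_eq_max]; push_cast; ring
  have hn : min (s.length : Int) (max R 0 * max C 0 * max H 0)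
      = ((min s.length (R.toNat * C.toNat * H.toNat) : Nat) : Int) := by
    rw [hcap]; exact_mod_cast (Nat.cast_min ..).symm
  simp only [hn]
  rw [PySem.List.pyRange_one]
  simp only [Int.sub_zero, Int.toNat_natCast, List.foldl_map, zero_add]
  apply PySem.List.foldl_congr_mem
  intro acc k hk
  rw [List.mem_range] at hk
  have hHn : 0 < H.toNat := by
    rcases Nat.eq_zero_or_pos H.toNat with h0 | h0
    · rw [h0] at hk; simp at hk
    · exact h0
  have hCn : 0 < C.toNat := by
    rcases Nat.eq_zero_or_pos C.toNat with h0 | h0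
    · rw [h0] at hk; simp at hk
    · exact h0
  have hH : H = (H.toNat : Int) := by omega
  have hC : C = (C.toNat : Int) := by omega
  have hHC : H * C = ((H.toNat * C.toNat : Nat) : Int) := by rw [hH, hC]; exact (Nat.cast_mul _ _).symm
  rw [hHC, hH, hC, PySem.Int.floordiv_natCast, PySem.Int.mod_natCast, PySem.Int.floordiv_natCast,
    PySem.Int.mod_natCast, PySem.List.pyGetD_natCast]
  simp only [Int.toNat_natCast]
  rw [Nat.mul_comm H.toNat C.toNat]

lemma pv_foldl_id {α : Type} (l : List α) (t : List (List (List Int))) :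
    l.foldl (fun t _ => t) t = t := by
  induction l generalizing t <;> simp_all

lemma pvF_zipIdx (s : List Int) (l : List (Nat × Nat × Nat)) :
    ∀ (t : List (List (List Int))) (k : Nat),
      pvF s l t k = (l.zipIdx k).foldl (fun t xp => pvG s t xp.2 xp.1) t := by
  induction l with
  | nil => intro t k; rfl
  | cons x xs ih => intro t k; rw [pvF, List.zipIdx_cons, List.foldl_cons, ih]

lemma pvCoords_zipIdx (R C H : Nat) :
    (pvCoords R C H).zipIdx 0 =
      (List.range (R * C * H)).map (fun i => ((i / (C * H), (i / H) % C, i % H), i)) := by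
  apply List.ext_getElem?
  intro i
  by_cases hi : i < R * C * H
  · rw [List.getElem?_zipIdx, pvCoords_getElem? R C H i hi]
    rw [List.getElem?_map, List.getElem?_range hi]
    simp
  · rw [List.getElem?_zipIdx]
    rw [List.getElem?_eq_none (by rw [pvCoords_length]; omega),
        List.getElem?_eq_none (by simp; omega)]
    rfl

lemma pvF_eq_rangeFold (s : List Int) (R C H : Nat) (t : List (List (List Int))) :
    pvF s (pvCoords R C H) t 0 =
      (List.range (min s.length (R * C * H))).foldl
        (fun t i => pvSet3 t ((i % H : Nat) : Int) ((i / (C * H) : Nat) : Int)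
          (((i / H) % C : Nat) : Int) (s.getD i 0)) t := by
  rw [pvF_zipIdx, pvCoords_zipIdx, List.foldl_map]
  have hsplit : R * C * H = min s.length (R * C * H) + (R * C * H - min s.length (R * C * H)) := by
    omega
  conv_lhs => rw [hsplit, List.range_add]
  rw [List.foldl_append, List.foldl_map]
  have h1 : (List.range (min s.length (R * C * H))).foldl
      (fun t i => pvG s t ((fun i => ((i / (C * H), (i / H) % C, i % H), i)) i).2
        ((fun i => ((i / (C * H), (i / H) % C, i % H), i)) i).1) t =
      (List.range (min s.length (R * C * H))).foldl
        (fun t i => pvSet3 t ((i % H : Nat) : Int) ((i / (C * H) : Nat) : Int)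
          (((i / H) % C : Nat) : Int) (s.getD i 0)) t := by
    apply PySem.List.foldl_congr_mem
    intro acc i hi
    rw [List.mem_range] at hi
    simp only [pvG]
    rw [if_pos (by omega)]
  rw [h1]
  set init := (List.range (min s.length (R * C * H))).foldl
        (fun t i => pvSet3 t ((i % H : Nat) : Int) ((i / (C * H) : Nat) : Int)
          (((i / H) % C : Nat) : Int) (s.getD i 0)) t with hinit
  have h2 : ∀ tt, (List.range (R * C * H - min s.length (R * C * H))).foldl
      (fun t j => pvG s t (min s.length (R * C * H) + j)
        (((min s.length (R * C * H) + j) / (C * H), ((min s.length (R * C * H) + j) / H) % C,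
          (min s.length (R * C * H) + j) % H))) tt = tt := by
    intro tt
    have hc : (List.range (R * C * H - min s.length (R * C * H))).foldl
        (fun t j => pvG s t (min s.length (R * C * H) + j)
          (((min s.length (R * C * H) + j) / (C * H), ((min s.length (R * C * H) + j) / H) % C,
            (min s.length (R * C * H) + j) % H))) tt =
        (List.range (R * C * H - min s.length (R * C * H))).foldl (fun t _ => t) tt := by
      apply PySem.List.foldl_congr_mem
      intro acc j hj
      rw [List.mem_range] at hj
      simp only [pvG]
      rw [if_neg (by omega)]
    rw [hc, pv_foldl_id]
  exact h2 init

-- ===== VERDICT (by name: the statement is the Claim_ definition above) =====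
theorem one_d_to_three_d_converter_spec : Claim_equal_one_d_to_three_d_converter := by
  intro s p R C H t _ _
  unfold Spec_one_d_to_three_d_converter
  rw [pvA_eq_pvF, pvB_eq_rangeFold, pvF_eq_rangeFold]
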